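-- pv_equiv track=rewrite | github.com/cwadven/algorism_programmers | Level2/기능개발/my_answer.py | solution
-- ===== SOURCE A (Python) =====
-- def solution(progresses, speeds):
--     count_list = []
--     _pop = []
--     while progresses:
--         count = 0
--         # while 문 한번에 speed 만큼 더한다,
--         for i in range(len(progresses)):
--             progresses[i] = progresses[i] + speeds[i]
--             # 100 이상일 경우 100으로 퉁친다
--             if progresses[i] > 100:
--                 progresses[i] = 100
--
--         for j in range(len(progresses)):
--             # (조건) 맨 앞에 있는게 100 이 될때
--             if progresses[j] == 100:
--                 _pop.append(j)
--                 count = count + 1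
--             else:
--                 break
--
--         _pop.sort(reverse=True)
--
--         for k in _pop:
--             progresses.pop(k)
--             speeds.pop(k)
--
--         if count:
--             count_list.append(count)
--
--         _pop = []
--
--     return count_list
-- ===== SOURCE B (Python) =====
-- def solution(progresses, speeds):
--     # Closed form: task i is done after max(1, ceil((100 - p) / s)) days; one pass
--     # grouping by the running maximum completion day. (Return value only: A empties
--     # its argument lists in place, B does not mutate them.)
--     answer = []
--     cur_day = 0
--     cnt = 0
--     for p, s in zip(progresses, speeds):
--         d = max(1, -((p - 100) // s))
--         if d > cur_day:
--             if cnt: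
--                 answer.append(cnt)
--             cur_day = d
--             cnt = 1
--         else:
--             cnt += 1
--     if cnt:
--         answer.append(cnt)
--     return answer
-- ===== Notes on version B (the rewrite author's own statement) =====
-- stated objective: alternative
-- what changed: Replaces the day-by-day simulation (each day re-adding speeds to every remaining task, scanning and popping the finished prefix) by a closed form: each task's completion day is max(1, ceil((100-p)/s)) and one pass groups tasks by the running maximum completion day (intended as asymptotically cheaper; a timing run could not measure a ratio because A times out on random inputs).
-- outside the precondition, e.g. on solution([150], [0]): A returns [1], B raises ZeroDivisionError; on solution([113, 90], [-5, 5]): A returns [1, 1], B returns [2]; on solution([50], [0]): A does not finish within the time limit, B raises ZeroDivisionError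
import Mathlib
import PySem

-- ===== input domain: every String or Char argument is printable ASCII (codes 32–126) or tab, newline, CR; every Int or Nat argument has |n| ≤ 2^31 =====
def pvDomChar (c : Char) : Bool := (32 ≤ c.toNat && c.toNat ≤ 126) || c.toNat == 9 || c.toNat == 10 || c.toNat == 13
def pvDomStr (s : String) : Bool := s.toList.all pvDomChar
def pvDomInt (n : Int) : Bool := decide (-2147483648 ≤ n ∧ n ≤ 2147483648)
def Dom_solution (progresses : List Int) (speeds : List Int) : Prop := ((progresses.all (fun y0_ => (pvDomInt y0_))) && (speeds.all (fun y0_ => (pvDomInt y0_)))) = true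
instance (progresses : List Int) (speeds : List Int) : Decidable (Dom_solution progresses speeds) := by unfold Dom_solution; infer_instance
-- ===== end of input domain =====

-- B replaces A's day-by-day simulation by a closed-form completion day per task
-- (max(1, ceil((100-p)/s))) grouped in one pass by the running maximum day (objective:
-- alternative; intended as asymptotically cheaper, but a timing run could not
-- measure a ratio — A often does not finish on random inputs).
-- Return value only: Python A empties its argument lists in place, B does not.


-- ===== PORT A =====
-- first inner for-loop: progresses[i] += speeds[i]; cap at 100
-- (the `_ :: _, []` case is where Python raises IndexError; excluded by Pre_solution)
def addLoop : List Int → List Int → List Int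
  | [], _ => []
  | _ :: _, [] => []
  | p :: ps, s :: ss => (if p + s > 100 then (100 : Int) else p + s) :: addLoop ps ss

-- second inner for-loop: collect leading indices equal to 100 (break at first non-100)
def popIdx : List Int → Nat → List Nat
  | [], _ => []
  | p :: ps, j => if p = 100 then j :: popIdx ps (j + 1) else []

-- the while loop; fuel only makes the (possibly diverging) Python loop total
def loopA : Nat → List Int → List Int → List Int → List Int
  | _, [], _, acc => acc
  | 0, _ :: _, _, acc => acc
  | fuel + 1, p :: ps, ss, acc =>
      let ps1 := addLoop (p :: ps) ss
      let pop := popIdx ps1 0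
      let rev := pop.reverse          -- _pop.sort(reverse=True): pop is ascending, so exact
      let ps2 := rev.foldl (fun l k => l.eraseIdx k) ps1   -- progresses.pop(k)
      let ss2 := rev.foldl (fun l k => l.eraseIdx k) ss    -- speeds.pop(k)
      let acc' := if pop.length ≠ 0 then acc ++ [(pop.length : Int)] else acc
      loopA fuel ps2 ss2 acc'

-- fuel bound: enough iterations under Pre_solution (each task needs ≤ (100-p)⁺+1 days)
def fuelFor (ps : List Int) : Nat := ps.foldl (fun a p => a + ((100 - p).toNat + 1)) 1

def solution (progresses : List Int) (speeds : List Int) : List Int :=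
  loopA (fuelFor progresses) progresses speeds []

-- ===== PORT B =====
-- d = max(1, -((p - 100) // s))
def dd (x : Int × Int) : Int := max 1 (-(PySem.Int.floordiv (x.1 - 100) x.2))

-- the for-loop over zip(progresses, speeds) with state (answer, cur_day, cnt)
def gloop : List (Int × Int) → List Int → Int → Int → List Int
  | [], ans, _, cnt => if cnt ≠ 0 then ans ++ [cnt] else ans
  | x :: xs, ans, cur, cnt =>
      let d := dd x
      if d > cur then gloop xs (if cnt ≠ 0 then ans ++ [cnt] else ans) d 1
      else gloop xs ans cur (cnt + 1)

def solution_alt (progresses : List Int) (speeds : List Int) : List Int :=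
  gloop (List.zip progresses speeds) [] 0 0

-- ===== PRECONDITION & SPEC =====
-- Pre_ excludes: len(progresses) > len(speeds), where A raises IndexError; and inputs
-- with a zipped speed ≤ 0, on which A usually diverges and otherwise returns a value
-- that is an artefact of its cap-at-100 rule (B raises ZeroDivisionError on speed 0 and
-- differs on some negative speeds).
def Pre_solution (progresses : List Int) (speeds : List Int) : Prop :=
  progresses.length ≤ speeds.length ∧ ∀ x ∈ List.zip progresses speeds, 1 ≤ x.2
instance (progresses : List Int) (speeds : List Int) : Decidable (Pre_solution progresses speeds) := by unfold Pre_solution; infer_instance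

def pvWitness_solution : List Int × List Int := ([93, 30, 55], [1, 30, 5])

def Spec_solution (progresses : List Int) (speeds : List Int) (out : List Int) : Prop := out = solution_alt progresses speeds
instance (progresses : List Int) (speeds : List Int) (out : List Int) : Decidable (Spec_solution progresses speeds out) := by unfold Spec_solution; infer_instance

-- ===== CLAIM (what is proved, stated in full; the proofs are below) =====
def Claim_equal_solution : Prop := ∀ (progresses : List Int) (speeds : List Int), Dom_solution progresses speeds → Pre_solution progresses speeds → Spec_solution progresses speeds (solution progresses speeds)

-- ===== LEMMAS AND PROOFS =====

-- value of a task (p, s) after t ≥ 1 simulated days (speed ≥ 1)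
def vval (t : Int) (x : Int × Int) : Int := min 100 (x.1 + t * x.2)

lemma done_iff (x : Int × Int) (hs : 1 ≤ x.2) (T : Int) (hT : 1 ≤ T) :
    vval T x = 100 ↔ dd x ≤ T := by
  have h := PySem.Int.le_floordiv_iff_mul_le (a := x.1 - 100) (b := x.2) (q := -T) (by omega)
  have key : (-(PySem.Int.floordiv (x.1 - 100) x.2) ≤ T) ↔ 100 ≤ x.1 + T * x.2 := by
    rw [neg_le, h, neg_mul]
    constructor <;> intro <;> linarith
  unfold vval dd
  set u := x.1 + T * x.2 with hu
  set c := -(PySem.Int.floordiv (x.1 - 100) x.2) with hc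
  constructor
  · intro h'
    have h100 : 100 ≤ u := by omega
    have := key.mpr h100
    omega
  · intro h'
    have hcT : c ≤ T := le_trans (le_max_right 1 c) h'
    have := key.mp hcT
    omega

lemma vstep (x : Int × Int) (hs : 1 ≤ x.2) (t : Int) :
    (if vval t x + x.2 > 100 then (100 : Int) else vval t x + x.2) = vval (t + 1) x := by
  unfold vval
  have h : x.1 + (t + 1) * x.2 = (x.1 + t * x.2) + x.2 := by ring
  rw [h]
  set u := x.1 + t * x.2
  split_ifs <;> omega

lemma addLoop_eq (f g : Int × Int → Int) :
    ∀ (ts : List (Int × Int)) (rest : List Int),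
      (∀ x ∈ ts, (if f x + x.2 > 100 then (100 : Int) else f x + x.2) = g x) →
      addLoop (ts.map f) (ts.map Prod.snd ++ rest) = ts.map g
  | [], rest, _ => by simp [addLoop]
  | x :: ts, rest, h => by
      simp only [List.map_cons, List.cons_append, addLoop]
      rw [addLoop_eq f g ts rest (fun y hy => h y (List.mem_cons_of_mem x hy)),
          h x (List.mem_cons_self)]

lemma popIdx_eq : ∀ (l : List Int) (j : Nat),
    popIdx l j = List.range' j (l.takeWhile (fun a => a == 100)).length 1
  | [], j => by simp [popIdx]
  | p :: l, j => by
      by_cases hp : p = 100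
      · simp [popIdx, hp, popIdx_eq l (j + 1), List.range'_succ]
      · simp [popIdx, hp, beq_false_of_ne hp]

lemma eraseIdx_drop {α : Type} : ∀ (c : Nat) (m : List α), (m.eraseIdx c).drop c = m.drop (c + 1)
  | 0, [] => by simp
  | 0, _ :: m => by simp
  | c + 1, [] => by simp
  | c + 1, a :: m => by
      simpa [List.eraseIdx, List.drop_succ_cons] using eraseIdx_drop c m

lemma eraseFold_drop {α : Type} : ∀ (c : Nat) (m : List α),
    ((List.range' 0 c 1).reverse).foldl (fun l k => l.eraseIdx k) m = m.drop c
  | 0, m => by simp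
  | c + 1, m => by
      rw [List.range'_concat]
      simp only [List.reverse_append, List.reverse_cons, List.reverse_nil, List.nil_append,
        List.cons_append, List.foldl_cons, Nat.zero_add, Nat.one_mul]
      rw [eraseFold_drop c (m.eraseIdx c), eraseIdx_drop]

lemma takeWhile_congr' {α : Type} (p q : α → Bool) :
    ∀ (l : List α), (∀ x ∈ l, p x = q x) → l.takeWhile p = l.takeWhile q
  | [], _ => rfl
  | x :: l, h => by
      have hx := h x List.mem_cons_self
      have := takeWhile_congr' p q l (fun y hy => h y (List.mem_cons_of_mem x hy))
      simp [List.takeWhile_cons, hx, this]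

lemma dropWhile_congr' {α : Type} (p q : α → Bool) :
    ∀ (l : List α), (∀ x ∈ l, p x = q x) → l.dropWhile p = l.dropWhile q
  | [], _ => rfl
  | x :: l, h => by
      have hx := h x List.mem_cons_self
      have := dropWhile_congr' p q l (fun y hy => h y (List.mem_cons_of_mem x hy))
      simp [List.dropWhile_cons, hx, this]

lemma drop_takeWhile_len {α : Type} (p : α → Bool) (l : List α) :
    l.drop (l.takeWhile p).length = l.dropWhile p := by
  have h : l.drop (l.takeWhile p).length
      = (l.takeWhile p ++ l.dropWhile p).drop (l.takeWhile p).length := by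
    rw [List.takeWhile_append_dropWhile]
  rw [h, List.drop_append_of_le_length (le_refl _), List.drop_length, List.nil_append]

lemma head_dropWhile_false {α : Type} (p : α → Bool) :
    ∀ (l : List α), ∀ y ∈ (l.dropWhile p).head?, p y = false
  | [], y => by simp
  | x :: l, y => by
      by_cases hx : p x
      · simpa [List.dropWhile_cons, hx] using head_dropWhile_false p l y
      · simp only [Bool.not_eq_true] at hx
        simp only [List.dropWhile_cons, hx, Bool.false_eq_true, if_false, List.head?_cons,
          Option.mem_def, Option.some.injEq]
        rintro rfl; exact hx

lemma gloop_prefix : ∀ (P xs : List (Int × Int)) (ans : List Int) (cur cnt : Int),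
    (∀ x ∈ P, dd x ≤ cur) →
    gloop (P ++ xs) ans cur cnt = gloop xs ans cur (cnt + P.length)
  | [], xs, ans, cur, cnt, _ => by simp
  | x :: P, xs, ans, cur, cnt, h => by
      have hx := h x List.mem_cons_self
      simp only [List.cons_append, gloop, List.length_cons]
      rw [if_neg (by omega : ¬ dd x > cur)]
      rw [gloop_prefix P xs ans cur (cnt + 1) (fun y hy => h y (List.mem_cons_of_mem x hy))]
      congr 1
      push_cast
      ring

lemma gloop_flush (xs : List (Int × Int)) (ans : List Int) (cur c : Int)
    (hc : c ≠ 0) (hh : ∀ y ∈ xs.head?, cur < dd y) :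
    gloop xs ans cur c = gloop xs (ans ++ [c]) cur 0 := by
  cases xs with
  | nil => simp [gloop, hc]
  | cons y ys =>
      have hy : cur < dd y := hh y (by simp)
      simp [gloop, hy, hc]

lemma gloop_shift (x : Int × Int) (xs : List (Int × Int)) (ans : List Int) (t : Int)
    (h1 : t + 1 < dd x) :
    gloop (x :: xs) ans t 0 = gloop (x :: xs) ans (t + 1) 0 := by
  simp [gloop, (by omega : t < dd x), h1]

lemma loopA_cons (fuel : Nat) (ps : List Int) (hps : ps ≠ []) (ss acc : List Int) :
    loopA (fuel + 1) ps ss acc =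
      loopA fuel
        (((popIdx (addLoop ps ss) 0).reverse).foldl (fun l k => l.eraseIdx k) (addLoop ps ss))
        (((popIdx (addLoop ps ss) 0).reverse).foldl (fun l k => l.eraseIdx k) ss)
        (if (popIdx (addLoop ps ss) 0).length ≠ 0
          then acc ++ [((popIdx (addLoop ps ss) 0).length : Int)] else acc) := by
  cases ps with
  | nil => exact absurd rfl hps
  | cons p ps => rfl

lemma loopA_eq : ∀ (fuel : Nat) (ts : List (Int × Int)) (f : Int × Int → Int)
    (rest acc : List Int) (t : Int),
    0 ≤ t →
    (∀ x ∈ ts, 1 ≤ x.2) →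
    (∀ x ∈ ts, dd x ≤ t + (fuel : Int)) →
    (∀ x ∈ ts, (if f x + x.2 > 100 then (100 : Int) else f x + x.2) = vval (t + 1) x) →
    (∀ y ∈ ts.head?, t < dd y) →
    loopA fuel (ts.map f) (ts.map Prod.snd ++ rest) acc = gloop ts acc t 0
  | fuel, [], f, rest, acc, t, _, _, _, _, _ => by cases fuel <;> simp [loopA, gloop]
  | 0, y :: ts', f, rest, acc, t, ht, hs, hfu, hstep, hhead => by
      exfalso
      have h1 := hfu y List.mem_cons_self
      have h2 := hhead y (by simp)
      simp only [Nat.cast_zero, add_zero] at h1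
      omega
  | fuel + 1, y :: ts', f, rest, acc, t, ht, hs, hfu, hstep, hhead => by
      have hadd : addLoop ((y :: ts').map f) ((y :: ts').map Prod.snd ++ rest)
          = (y :: ts').map (vval (t + 1)) :=
        addLoop_eq f (vval (t + 1)) (y :: ts') rest hstep
      set q : Int × Int → Bool := fun x => decide (dd x ≤ t + 1) with hq
      have hqcong : ∀ x ∈ (y :: ts'), ((fun a : Int => a == 100) ∘ vval (t + 1)) x = q x := by
        intro x hx
        have hiff := done_iff x (hs x hx) (t + 1) (by omega)
        simp only [Function.comp, hq, beq_iff_eq]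
        by_cases hdd : dd x ≤ t + 1
        · simp [hdd, hiff.mpr hdd]
        · simp only [hdd, decide_false, beq_eq_false_iff_ne, ne_eq]
          exact fun hcon => hdd (hiff.mp hcon)
      set c : Nat := ((y :: ts').takeWhile q).length with hcdef
      have hclen : (((y :: ts').map (vval (t + 1))).takeWhile (fun a => a == 100)).length = c := by
        rw [List.takeWhile_map, takeWhile_congr' _ q (y :: ts') hqcong, List.length_map]
      have hpop : popIdx ((y :: ts').map (vval (t + 1))) 0 = List.range' 0 c 1 := by
        rw [popIdx_eq, hclen]
      have hcle : c ≤ (y :: ts').length := by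
        rw [hcdef]; exact (List.takeWhile_sublist _).length_le
      have hdw : (y :: ts').drop c = (y :: ts').dropWhile q := by
        rw [hcdef, drop_takeWhile_len]
      set ts2 := (y :: ts').dropWhile q with hts2
      have hdrop1 : ((y :: ts').map (vval (t + 1))).drop c = ts2.map (vval (t + 1)) := by
        rw [← List.map_drop, hdw]
      have hdrop2 : ((y :: ts').map Prod.snd ++ rest).drop c = ts2.map Prod.snd ++ rest := by
        rw [List.drop_append_of_le_length (by simpa using hcle), ← List.map_drop, hdw]
      have hsub : ts2.Sublist (y :: ts') := List.dropWhile_sublist q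
      have hs2 : ∀ x ∈ ts2, 1 ≤ x.2 := fun x hx => hs x (hsub.subset hx)
      have hfu2 : ∀ x ∈ ts2, dd x ≤ (t + 1) + (fuel : Int) := by
        intro x hx
        have := hfu x (hsub.subset hx)
        push_cast at this ⊢
        omega
      have hstep2 : ∀ x ∈ ts2,
          (if vval (t + 1) x + x.2 > 100 then (100 : Int) else vval (t + 1) x + x.2)
            = vval (t + 1 + 1) x :=
        fun x hx => vstep x (hs2 x hx) (t + 1)
      have hhead2 : ∀ y' ∈ ts2.head?, t + 1 < dd y' := by
        intro y' hy'
        have hfalse := head_dropWhile_false q (y :: ts') y' hy'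
        simp only [hq, decide_eq_false_iff_not, not_le] at hfalse
        omega
      have hIH := fun acc' => loopA_eq fuel ts2 (vval (t + 1)) rest acc' (t + 1) (by omega)
        hs2 hfu2 hstep2 hhead2
      rw [loopA_cons fuel ((y :: ts').map f) (by simp) ((y :: ts').map Prod.snd ++ rest) acc,
        hadd, hpop, eraseFold_drop, eraseFold_drop, List.length_range', hdrop1, hdrop2]
      by_cases hc0 : c = 0
      · -- no task finishes this day: shift B's cur_day by one
        have hqy : q y = false := by
          by_contra hqy
          simp only [Bool.not_eq_false] at hqy
          have : (y :: ts').takeWhile q = y :: ts'.takeWhile q := by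
            simp [List.takeWhile_cons, hqy]
          rw [hcdef, this] at hc0
          simp at hc0
        have hts2eq : ts2 = y :: ts' := by
          rw [hts2, List.dropWhile_cons, hqy]
          simp
        have hddy : t + 1 < dd y := by
          simp only [hq, decide_eq_false_iff_not, not_le] at hqy
          omega
        rw [if_neg (by omega), hIH acc, hts2eq]
        exact (gloop_shift y ts' acc t hddy).symm
      · -- c tasks finish this day: they form B's group for day t+1
        have hqy : q y = true := by
          by_contra hqy
          simp only [Bool.not_eq_true] at hqy
          rw [hcdef, List.takeWhile_cons, hqy] at hc0
          simp at hc0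
        have hddy : dd y = t + 1 := by
          have h1 := hhead y (by simp)
          simp only [hq, decide_eq_true_eq] at hqy
          omega
        have htk : (y :: ts').takeWhile q = y :: ts'.takeWhile q := by
          simp [List.takeWhile_cons, hqy]
        have hts2' : ts2 = ts'.dropWhile q := by
          rw [hts2, List.dropWhile_cons, hqy]
          simp
        have hcP : c = (ts'.takeWhile q).length + 1 := by
          rw [hcdef, htk]; simp
        have hsplit : ts' = ts'.takeWhile q ++ ts2 := by
          rw [hts2', List.takeWhile_append_dropWhile]
        have hR : gloop (y :: ts') acc t 0 = gloop ts2 (acc ++ [(c : Int)]) (t + 1) 0 := by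
          have h1 : gloop (y :: ts') acc t 0
              = gloop (ts'.takeWhile q ++ ts2) acc (t + 1) 1 := by
            simp only [gloop]
            rw [if_pos (by omega : dd y > t), hddy]
            rw [← hsplit]
            simp
          rw [h1, gloop_prefix (ts'.takeWhile q) ts2 acc (t + 1) 1
            (fun x hx => by
              have := List.mem_takeWhile_imp hx
              simpa [hq] using this)]
          rw [gloop_flush ts2 acc (t + 1) (1 + (ts'.takeWhile q).length)
            (by positivity) hhead2]
          congr 2
          rw [hcP]
          push_cast
          ring
        rw [if_pos (by omega), hIH (acc ++ [(c : Int)]), hR]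

lemma zip_snd_append : ∀ (ps ss : List Int), ps.length ≤ ss.length →
    (List.zip ps ss).map Prod.snd ++ ss.drop ps.length = ss
  | [], ss, _ => by simp
  | p :: ps, [], h => by simp at h
  | p :: ps, s :: ss, h => by
      simp only [List.zip_cons_cons, List.map_cons, List.cons_append, List.length_cons,
        List.drop_succ_cons]
      rw [zip_snd_append ps ss (by simpa using h)]

lemma dd_bound (x : Int × Int) (hs : 1 ≤ x.2) : dd x ≤ ((100 - x.1).toNat : Int) + 1 := by
  have htn : (((100 - x.1).toNat : Int)) = max (100 - x.1) 0 := Int.toNat_eq_max _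
  unfold dd
  by_cases hle : 100 - x.1 ≤ 0
  case pos =>
    have h0 : (0 : Int) ≤ PySem.Int.floordiv (x.1 - 100) x.2 := by
      have := (PySem.Int.le_floordiv_iff_mul_le (a := x.1 - 100) (b := x.2) (q := 0)
        (by omega)).mpr (by nlinarith)
      exact this
    rw [htn] at *
    omega
  case neg =>
    have h1 : (-(100 - x.1)) ≤ PySem.Int.floordiv (x.1 - 100) x.2 := by
      apply (PySem.Int.le_floordiv_iff_mul_le (a := x.1 - 100) (b := x.2)
        (q := -(100 - x.1)) (by omega)).mpr
      have h2 : (100 - x.1) * 1 ≤ (100 - x.1) * x.2 :=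
        mul_le_mul_of_nonneg_left hs (by omega)
      nlinarith
    rw [htn] at *
    omega

lemma fuel_ge : ∀ (ps : List Int) (a : Nat),
    a ≤ ps.foldl (fun a p => a + ((100 - p).toNat + 1)) a
  | [], a => le_refl a
  | p :: ps, a => by
      simp only [List.foldl_cons]
      exact le_trans (by omega) (fuel_ge ps (a + ((100 - p).toNat + 1)))

lemma fuel_bound : ∀ (ps : List Int) (a : Nat) (p : Int), p ∈ ps →
    (100 - p).toNat + 1 ≤ ps.foldl (fun a p => a + ((100 - p).toNat + 1)) a
  | [], a, p, h => by simp at h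
  | q :: ps, a, p, h => by
      simp only [List.foldl_cons]
      rcases List.mem_cons.mp h with rfl | h'
      · exact le_trans (by omega) (fuel_ge ps (a + ((100 - p).toNat + 1)))
      · exact fuel_bound ps _ p h'

-- ===== VERDICT (by name: the statement is the Claim_ definition above) =====
theorem solution_spec : Claim_equal_solution := by
  intro ps ss _ hpre
  obtain ⟨hlen, hsp⟩ := hpre
  unfold Spec_solution solution solution_alt
  have hfu : ∀ x ∈ List.zip ps ss, dd x ≤ 0 + ((fuelFor ps : Nat) : Int) := by
    intro x hx
    obtain ⟨a, b⟩ := x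
    have hx1 : a ∈ ps := (List.of_mem_zip hx).1
    have h1 := dd_bound (a, b) (hsp (a, b) hx)
    have h2 := fuel_bound ps 1 a hx1
    unfold fuelFor
    simp only at h1 ⊢
    omega
  have hstep : ∀ x ∈ List.zip ps ss,
      (if x.1 + x.2 > 100 then (100 : Int) else x.1 + x.2) = vval (0 + 1) x := by
    intro x _
    unfold vval
    norm_num
    split_ifs <;> omega
  have hhead : ∀ y ∈ (List.zip ps ss).head?, (0 : Int) < dd y := by
    intro y _
    have := le_max_left 1 (-(PySem.Int.floordiv (y.1 - 100) y.2))
    unfold dd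
    omega
  have h := loopA_eq (fuelFor ps) (List.zip ps ss) Prod.fst (ss.drop ps.length) [] 0
    (le_refl 0) hsp hfu hstep hhead
  rw [List.map_fst_zip hlen, zip_snd_append ps ss hlen] at h
  exact h
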